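-- pv_equiv track=rewrite | github.com/arayabrain/optinist-for-cloud | studio/app/optinist/wrappers/optinist/utils.py | split_dictionary
-- ===== SOURCE A (Python) =====
-- def split_dictionary(original_dict: dict, keys_to_remove: list):
--     removed_dict = {
--         key: original_dict[key] for key in keys_to_remove if key in original_dict
--     }
--     remaining_dict = {
--         key: value for key, value in original_dict.items() if key not in keys_to_remove
--     }
--
--     return remaining_dict, removed_dict
-- ===== SOURCE B (Python) =====
-- def split_dictionary(original_dict: dict, keys_to_remove: list):
--     # Copy-then-pop: remaining starts as a copy of the whole dict; one loop over
--     # keys_to_remove destructively pops matches into removed. The items are never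
--     # scanned and no membership test against the key list is performed.
--     remaining_dict = dict(original_dict)
--     removed_dict = {}
--     for key in keys_to_remove:
--         if key in remaining_dict:
--             removed_dict[key] = remaining_dict.pop(key)
--     return remaining_dict, removed_dict
-- ===== Notes on version B (the rewrite author's own statement) =====
-- stated objective: faster
-- what changed: Instead of A's two comprehensions (one building removed by lookups over keys_to_remove, one filtering the items with an O(m) list-membership test per item), B copies the dict once and runs a single destructive loop over keys_to_remove, popping each present key from remaining into removed; the items are never scanned and no membership test against the key list occurs.
import Mathlib
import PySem

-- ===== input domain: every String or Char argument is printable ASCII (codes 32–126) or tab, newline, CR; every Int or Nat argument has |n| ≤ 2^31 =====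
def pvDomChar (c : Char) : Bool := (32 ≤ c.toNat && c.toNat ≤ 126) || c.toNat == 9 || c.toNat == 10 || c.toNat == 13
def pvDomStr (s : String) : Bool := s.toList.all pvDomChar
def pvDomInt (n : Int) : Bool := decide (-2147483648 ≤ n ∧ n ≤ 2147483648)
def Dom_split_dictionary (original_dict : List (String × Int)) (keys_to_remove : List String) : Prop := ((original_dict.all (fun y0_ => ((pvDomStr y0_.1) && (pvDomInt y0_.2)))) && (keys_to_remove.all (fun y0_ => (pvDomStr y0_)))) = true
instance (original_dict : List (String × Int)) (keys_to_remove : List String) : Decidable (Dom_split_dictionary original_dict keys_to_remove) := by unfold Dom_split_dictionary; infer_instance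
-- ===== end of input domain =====

-- B replaces A's two comprehensions by a copy of the dict followed by one destructive loop
-- over keys_to_remove that pops each present key from remaining into removed (objective: faster).


-- ===== PORT A =====
def split_dictionary (original_dict : List (String × Int)) (keys_to_remove : List String) : (List (String × Int)) × (List (String × Int)) :=
  let d : PySem.Dict String Int := PySem.Dict.mk original_dict
  -- removed_dict = {key: original_dict[key] for key in keys_to_remove if key in original_dict}
  let removed_dict : PySem.Dict String Int :=
    keys_to_remove.foldl (fun acc key =>
      if d.contains key then acc.insert key (d.getD key 0) else acc) PySem.Dict.empty
  -- remaining_dict = {key: value for key, value in original_dict.items() if key not in keys_to_remove}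
  let remaining_dict : PySem.Dict String Int :=
    original_dict.foldl (fun acc kv =>
      if keys_to_remove.contains kv.1 then acc else acc.insert kv.1 kv.2) PySem.Dict.empty
  (remaining_dict.items, removed_dict.items)

-- ===== PORT B =====
def split_dictionary_alt (original_dict : List (String × Int)) (keys_to_remove : List String) : (List (String × Int)) × (List (String × Int)) :=
  -- remaining_dict = dict(original_dict); removed_dict = {}
  -- for key in keys_to_remove: if key in remaining_dict: removed_dict[key] = remaining_dict.pop(key)
  -- ('if key in d: v = d.pop(key)' is the some-branch of pop?, which is none exactly when the key is absent)
  let st : PySem.Dict String Int × PySem.Dict String Int :=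
    keys_to_remove.foldl (fun p key =>
      match p.1.pop? key with
      | some (v, rest) => (rest, p.2.insert key v)
      | none => p)
      (PySem.Dict.mk original_dict, PySem.Dict.empty)
  (st.1.items, st.2.items)

-- ===== PRECONDITION & SPEC =====
-- Pre_ restricts the association list to distinct keys: it stands for a Python dict, whose keys
-- are unique; a duplicate-keyed list does not arise from any dict input to A.
def Pre_split_dictionary (original_dict : List (String × Int)) (keys_to_remove : List String) : Prop :=
  (original_dict.map Prod.fst).Nodup
instance (original_dict : List (String × Int)) (keys_to_remove : List String) : Decidable (Pre_split_dictionary original_dict keys_to_remove) := by unfold Pre_split_dictionary; infer_instance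
def pvWitness_split_dictionary : (List (String × Int)) × List String := ([("a", 1), ("b", 2), ("c", 3)], ["b", "x", "b"])

def Spec_split_dictionary (original_dict : List (String × Int)) (keys_to_remove : List String) (out : (List (String × Int)) × (List (String × Int))) : Prop := out = split_dictionary_alt original_dict keys_to_remove
instance (original_dict : List (String × Int)) (keys_to_remove : List String) (out : (List (String × Int)) × (List (String × Int))) : Decidable (Spec_split_dictionary original_dict keys_to_remove out) := by unfold Spec_split_dictionary; infer_instance

-- ===== CLAIM (what is proved, stated in full; the proofs are below) =====
def Claim_equal_split_dictionary : Prop := ∀ (original_dict : List (String × Int)) (keys_to_remove : List String), Dom_split_dictionary original_dict keys_to_remove → Pre_split_dictionary original_dict keys_to_remove → Spec_split_dictionary original_dict keys_to_remove (split_dictionary original_dict keys_to_remove)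

-- ===== LEMMAS AND PROOFS =====

theorem insert_same {κ ν : Type} [BEq κ] [LawfulBEq κ] (d : PySem.Dict κ ν) (k : κ) (v : ν)
    (hnd : d.keys.Nodup) (h : d.get? k = some v) : d.insert k v = d := by
  have hc : d.contains k = true := by rw [PySem.Dict.contains_eq_isSome_get?, h]; rfl
  apply PySem.Dict.ext
  rw [PySem.Dict.items_insert_of_contains d v hc]
  apply List.map_congr_left ?_ |>.trans (List.map_id _)
  intro p hp
  by_cases hk : p.1 = k
  · have : d.get? p.1 = some p.2 := PySem.Dict.get?_of_mem_items d hp hnd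
    rw [hk] at this; rw [h] at this
    simp [hk, ← Option.some.inj this, Prod.ext_iff]
  · simp [hk]

theorem get?_mk_filter (od : List (String × Int)) (pred : String → Bool) (k : String)
    (hk : pred k = true) :
    (PySem.Dict.mk (od.filter (fun kv => pred kv.1))).get? k = (PySem.Dict.mk od).get? k := by
  induction od with
  | nil => simp
  | cons kv t ih =>
    by_cases h : kv.1 = k
    · subst h
      rw [List.filter_cons]
      simp only [hk, if_true]
      rw [PySem.Dict.get?_mk_cons, PySem.Dict.get?_mk_cons]
      simp
    · rw [List.filter_cons]
      by_cases hp : pred kv.1 = true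
      · simp only [hp, if_true]
        rw [PySem.Dict.get?_mk_cons, PySem.Dict.get?_mk_cons]
        simp [h, ih]
      · simp only [hp]
        rw [PySem.Dict.get?_mk_cons]
        simp [h, ih]

theorem removed_fold_erase (cur : List (String × Int)) (k : String) (v : Int)
    (hv : (PySem.Dict.mk cur).get? k = some v) :
    ∀ (t : List String) (acc : PySem.Dict String Int), acc.keys.Nodup → acc.get? k = some v →
    t.foldl (fun acc key =>
        if (PySem.Dict.mk (cur.filter (fun p => !(p.1 == k)))).contains key then
          acc.insert key ((PySem.Dict.mk (cur.filter (fun p => !(p.1 == k)))).getD key 0)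
        else acc) acc
      = t.foldl (fun acc key =>
        if (PySem.Dict.mk cur).contains key then
          acc.insert key ((PySem.Dict.mk cur).getD key 0)
        else acc) acc := by
  intro t
  induction t with
  | nil => intro acc _ _; rfl
  | cons x t ih =>
    intro acc hnd hk
    simp only [List.foldl_cons]
    by_cases hx : x = k
    · subst hx
      have hcf : (PySem.Dict.mk (cur.filter (fun p => !(p.1 == x)))).contains x = false := by
        simp [PySem.Dict.contains, List.any_filter]
      have hcc : (PySem.Dict.mk cur).contains x = true := by
        rw [PySem.Dict.contains_eq_isSome_get?, hv]; rfl
      simp only [hcf, hcc, Bool.false_eq_true, if_false, if_true]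
      rw [PySem.Dict.getD_eq_get?_getD, hv]
      simp only [Option.getD_some]
      rw [insert_same acc x v hnd hk]
      exact ih acc hnd hk
    · have hg : (PySem.Dict.mk (cur.filter (fun p => !(p.1 == k)))).get? x
          = (PySem.Dict.mk cur).get? x := by
        have := get?_mk_filter cur (fun key => !(key == k)) x (by simp [hx])
        simpa using this
      have hcont : (PySem.Dict.mk (cur.filter (fun p => !(p.1 == k)))).contains x
          = (PySem.Dict.mk cur).contains x := by
        rw [PySem.Dict.contains_eq_isSome_get?, PySem.Dict.contains_eq_isSome_get?, hg]
      rw [hcont]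
      by_cases hc : (PySem.Dict.mk cur).contains x = true
      · simp only [hc, if_true]
        rw [PySem.Dict.getD_eq_get?_getD, PySem.Dict.getD_eq_get?_getD, hg]
        exact ih _ (PySem.Dict.nodup_keys_insert _ _ _ hnd)
          (by rw [PySem.Dict.get?_insert_of_ne _ _ (fun h : k = x => hx h.symm), hk])
      · simp only [hc, Bool.false_eq_true, if_false]
        exact ih acc hnd hk

theorem loop_eq (l : List String) : ∀ (cur : List (String × Int)),
    (cur.map Prod.fst).Nodup → ∀ acc : PySem.Dict String Int, acc.keys.Nodup →
    l.foldl (fun (p : PySem.Dict String Int × PySem.Dict String Int) key =>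
        match p.1.pop? key with
        | some (v, rest) => (rest, p.2.insert key v)
        | none => p) (PySem.Dict.mk cur, acc)
      = (PySem.Dict.mk (cur.filter (fun kv => !(l.contains kv.1))),
         l.foldl (fun acc key =>
           if (PySem.Dict.mk cur).contains key then
             acc.insert key ((PySem.Dict.mk cur).getD key 0)
           else acc) acc) := by
  induction l with
  | nil => intro cur _ acc _; simp
  | cons k t ih =>
    intro cur hnd acc hacc
    simp only [List.foldl_cons]
    rcases hg : (PySem.Dict.mk cur).get? k with _ | v
    · -- key absent: pop? is none, A's step skips
      have hc : (PySem.Dict.mk cur).contains k = false := by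
        rw [PySem.Dict.contains_eq_isSome_get?, hg]; rfl
      have hpop : (PySem.Dict.mk cur).pop? k = none := by
        simp [PySem.Dict.pop?, hg]
      rw [hpop]
      have hfilt : cur.filter (fun kv => !((k :: t).contains kv.1))
          = cur.filter (fun kv => !(t.contains kv.1)) := by
        apply List.filter_congr
        intro p hp
        have : ¬(p.1 == k) := by
          simp [PySem.Dict.contains] at hc
          simp [hc p.1 p.2 hp]
        simp at this ⊢
        simp [this]
      rw [ih cur hnd acc hacc, hfilt]
      simp [hc]
    · -- key present: pop it
      have hc : (PySem.Dict.mk cur).contains k = true := by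
        rw [PySem.Dict.contains_eq_isSome_get?, hg]; rfl
      have hpop : (PySem.Dict.mk cur).pop? k
          = some (v, PySem.Dict.mk (cur.filter (fun p => !(p.1 == k)))) := by
        simp [PySem.Dict.pop?, hg, PySem.Dict.erase]
      rw [hpop]
      have hnd' : ((cur.filter (fun p => !(p.1 == k))).map Prod.fst).Nodup :=
        hnd.sublist (List.Sublist.map Prod.fst List.filter_sublist)
      rw [ih (cur.filter (fun p => !(p.1 == k))) hnd' (acc.insert k v)
          (PySem.Dict.nodup_keys_insert _ _ _ hacc)]
      refine Prod.ext ?_ ?_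
      · show PySem.Dict.mk _ = PySem.Dict.mk _
        congr 1
        rw [List.filter_filter]
        apply List.filter_congr
        intro p _
        simp only [List.contains_cons, Bool.not_or, Bool.and_comm]
      · show _ = List.foldl _ _ t
        simp only [hc, if_true]
        rw [PySem.Dict.getD_eq_get?_getD, hg]
        simp only [Option.getD_some]
        exact removed_fold_erase cur k v hg t (acc.insert k v)
          (PySem.Dict.nodup_keys_insert _ _ _ hacc) (PySem.Dict.get?_insert_self _ _ _)

theorem split_dictionary_spec' (od : List (String × Int)) (krm : List String)
    (hnd : (od.map Prod.fst).Nodup) :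
    split_dictionary od krm = split_dictionary_alt od krm := by
  simp only [split_dictionary, split_dictionary_alt]
  rw [loop_eq krm od hnd PySem.Dict.empty PySem.Dict.nodup_keys_empty]
  refine Prod.ext ?_ rfl
  show (od.foldl (fun acc kv =>
      if krm.contains kv.1 then acc else acc.insert kv.1 kv.2) PySem.Dict.empty).items
    = (PySem.Dict.mk (od.filter (fun kv => !(krm.contains kv.1)))).items
  have hflip : od.foldl (fun acc kv =>
        if krm.contains kv.1 then acc else acc.insert kv.1 kv.2) PySem.Dict.empty
      = od.foldl (fun acc kv =>
        if !(krm.contains kv.1) then acc.insert kv.1 kv.2 else acc) PySem.Dict.empty :=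
    PySem.List.foldl_congr_mem od _ _ _
      (by intro acc kv _; by_cases h : krm.contains kv.1 <;> simp_all)
  rw [hflip, PySem.List.foldl_if_eq_foldl_filter]
  rw [PySem.Dict.items_foldl_insert_fresh (od.filter (fun kv => !(krm.contains kv.1)))
      (fun a : String × Int => a.1) (fun a : String × Int => a.2) PySem.Dict.empty
      (fun a _ => PySem.Dict.contains_empty a.1)
      (hnd.sublist (List.Sublist.map Prod.fst List.filter_sublist))]
  simp [PySem.Dict.empty]

-- ===== VERDICT (by name: the statement is the Claim_ definition above) =====
theorem split_dictionary_spec : Claim_equal_split_dictionary := by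
  intro od krm _ hpre
  unfold Spec_split_dictionary
  exact split_dictionary_spec' od krm hpre
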